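-- pv_equiv track=rewrite | github.com/k3rnlpnc/crypto | operations.py | get_uneven_bits
-- ===== SOURCE A (Python) =====
-- def get_uneven_bits(integer):
--     uneven = ''
--     if not integer.bit_length() % 2:
--         integer >>= 1
--     while integer:
--         uneven += str(integer & 1)
--         integer >>= 2
--     if uneven:
--         return int(uneven[::-1], 2)
--     else:
--         return 0
-- ===== SOURCE B (Python) =====
-- def get_uneven_bits(integer):
--     # Take every other bit from the MSB side of the binary representation:
--     # bin(integer) is '0b...'; [2::2] keeps exactly the bits A keeps, in MSB order.
--     return int(bin(integer)[2::2], 2)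
-- ===== Notes on version B (the rewrite author's own statement) =====
-- stated objective: simpler
-- what changed: Replaces the parity pre-shift, LSB-first bit-masking loop and string reversal with a single strided slice of bin(integer) parsed back with int(.,2).
import Mathlib
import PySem

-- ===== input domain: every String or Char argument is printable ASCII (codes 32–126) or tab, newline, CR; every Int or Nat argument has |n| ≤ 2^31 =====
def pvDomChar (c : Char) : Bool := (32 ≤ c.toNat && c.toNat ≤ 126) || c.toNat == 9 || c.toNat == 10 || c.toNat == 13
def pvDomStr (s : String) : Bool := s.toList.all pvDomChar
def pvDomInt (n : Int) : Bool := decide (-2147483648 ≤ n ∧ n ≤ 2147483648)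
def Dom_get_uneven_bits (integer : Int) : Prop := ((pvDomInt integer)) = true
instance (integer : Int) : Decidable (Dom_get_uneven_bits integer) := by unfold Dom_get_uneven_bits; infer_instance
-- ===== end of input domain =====

-- B replaces A's parity pre-shift + LSB-first masking loop + reversal by slicing every
-- other character of bin(integer) and parsing it back (simpler, same asymptotics).
-- Pre_ excludes negative inputs: there A loops forever and B raises ValueError.


-- ===== PORT A =====
-- str(bit)
def pvBitChar (b : Nat) : Char := if b = 1 then '1' else '0'

-- int(s, 2) for a string of '0'/'1' chars (MSB first)
def pvParse (s : List Char) : Nat :=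
  s.foldl (fun acc c => 2 * acc + (if c = '1' then 1 else 0)) 0

-- Python int.bit_length() on a non-negative value
def pvBitLen (n : Nat) : Nat :=
  if n = 0 then 0 else pvBitLen (n / 2) + 1
decreasing_by exact Nat.div_lt_self (Nat.pos_of_ne_zero (by assumption)) (by norm_num)

-- the while loop of A: uneven += str(integer & 1); integer >>= 2
def pvALoop (n : Nat) (uneven : List Char) : List Char :=
  if n = 0 then uneven else pvALoop (n / 4) (uneven ++ [pvBitChar (n % 2)])
decreasing_by exact Nat.div_lt_self (Nat.pos_of_ne_zero (by assumption)) (by norm_num)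

-- the loop runs on Nat: the Python loop terminates only for integer ≥ 0 (Pre_ excludes the rest)
def get_uneven_bits (integer : Int) : Int :=
  let n0 : Nat := integer.toNat
  let n : Nat := if pvBitLen n0 % 2 = 0 then n0 / 2 else n0
  let uneven : List Char := pvALoop n []
  if uneven ≠ [] then (pvParse uneven.reverse : Int) else 0

-- ===== PORT B =====
-- digits of bin(n) after the '0b' prefix (MSB first; bin(0) = '0b0')
def pvBinDigits (n : Nat) : List Char :=
  if h : n < 2 then [pvBitChar n]
  else pvBinDigits (n / 2) ++ [pvBitChar (n % 2)]
decreasing_by exact Nat.div_lt_self (by omega) (by norm_num)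

-- the [::2] stride applied to the digit list (indices 0, 2, 4, …)
def pvEveryOther (s : List Char) : List Char :=
  match s with
  | [] => []
  | [a] => [a]
  | a :: _ :: t => a :: pvEveryOther t

-- int(bin(integer)[2::2], 2); Python raises ValueError for integer < 0 (excluded by Pre_)
def get_uneven_bits_alt (integer : Int) : Int :=
  (pvParse (pvEveryOther (pvBinDigits integer.toNat)) : Int)

-- ===== PRECONDITION & SPEC =====
-- Pre_ excludes integer < 0: A's while loop never terminates there (and B raises ValueError)
def Pre_get_uneven_bits (integer : Int) : Prop := 0 ≤ integer
instance (integer : Int) : Decidable (Pre_get_uneven_bits integer) := by unfold Pre_get_uneven_bits; infer_instance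
def pvWitness_get_uneven_bits : Int := (37)

def Spec_get_uneven_bits (integer : Int) (out : Int) : Prop := out = get_uneven_bits_alt integer
instance (integer : Int) (out : Int) : Decidable (Spec_get_uneven_bits integer out) := by unfold Spec_get_uneven_bits; infer_instance

-- ===== CLAIM (what is proved, stated in full; the proofs are below) =====
def Claim_equal_get_uneven_bits : Prop := ∀ (integer : Int), Dom_get_uneven_bits integer → Pre_get_uneven_bits integer → Spec_get_uneven_bits integer (get_uneven_bits integer)

-- ===== LEMMAS AND PROOFS =====

-- the common value both ports compute: g 0 = 0, g n = n % 2 + 2 * g (n / 4)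
def pvG (n : Nat) : Nat :=
  if n = 0 then 0 else n % 2 + 2 * pvG (n / 4)
decreasing_by exact Nat.div_lt_self (Nat.pos_of_ne_zero (by assumption)) (by norm_num)

theorem pvParse_append_one (s : List Char) (c : Char) :
    pvParse (s ++ [c]) = 2 * pvParse s + (if c = '1' then 1 else 0) := by
  simp [pvParse, List.foldl_append]

theorem pvALoop_acc (n : Nat) (acc : List Char) :
    pvALoop n acc = acc ++ pvALoop n [] := by
  induction n using Nat.strong_induction_on generalizing acc with
  | _ n ih =>
    by_cases h : n = 0
    · simp [pvALoop, h]
    · conv_lhs => rw [pvALoop]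
      conv_rhs => rw [pvALoop]
      rw [if_neg h, if_neg h,
        ih (n / 4) (Nat.div_lt_self (Nat.pos_of_ne_zero h) (by norm_num)),
        ih (n / 4) (Nat.div_lt_self (Nat.pos_of_ne_zero h) (by norm_num)) ([] ++ [pvBitChar (n % 2)])]
      simp

theorem pvA_eq_pvG (n : Nat) : pvParse (pvALoop n []).reverse = pvG n := by
  induction n using pvG.induct with
  | case1 => simp [pvALoop, pvParse, pvG]
  | case2 n h ih =>
    rw [pvALoop, if_neg h, pvALoop_acc, pvG, if_neg h]
    simp only [List.reverse_cons, List.nil_append, List.singleton_append]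
    rw [show ((pvALoop (n / 4) []).reverse ++ [pvBitChar (n % 2)]) =
        (pvALoop (n / 4) []).reverse ++ [pvBitChar (n % 2)] from rfl,
      pvParse_append_one, ih]
    have h2 : n % 2 < 2 := Nat.mod_lt _ (by norm_num)
    interval_cases hb : n % 2 <;> simp [pvBitChar] <;> omega

theorem pvBinDigits_length (n : Nat) (hn : n ≠ 0) :
    (pvBinDigits n).length = pvBitLen n := by
  induction n using pvBinDigits.induct with
  | case1 n h =>
    interval_cases n
    · omega
    · simp [pvBinDigits, pvBitLen]
  | case2 n h ih =>
    rw [pvBinDigits, dif_neg h, pvBitLen, if_neg (by omega)]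
    simp [ih (by omega)]

theorem pvEveryOther_append_two (s : List Char) (x y : Char) :
    pvEveryOther (s ++ [x, y]) =
      pvEveryOther s ++ [if s.length % 2 = 0 then x else y] := by
  induction s using pvEveryOther.induct with
  | case1 => simp [pvEveryOther]
  | case2 a => simp [pvEveryOther]
  | case3 a b t ih =>
    simp only [List.cons_append, pvEveryOther, ih, List.length_cons]
    simp only [show ((t.length + 1 + 1) % 2 = 0) ↔ (t.length % 2 = 0) from by omega]

theorem pvBitLen_div4 (n : Nat) (hn : 4 ≤ n) :
    pvBitLen n = pvBitLen (n / 4) + 2 := by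
  rw [pvBitLen, if_neg (by omega), pvBitLen, if_neg (by omega)]
  rw [Nat.div_div_eq_div_mul]

theorem pvB_eq (n : Nat) :
    pvParse (pvEveryOther (pvBinDigits n)) =
      pvG (if pvBitLen n % 2 = 0 then n / 2 else n) := by
  induction n using Nat.strong_induction_on with
  | _ n ih =>
    match hlt : decide (n < 4) with
    | true =>
      have h4 : n < 4 := of_decide_eq_true hlt
      interval_cases n <;> simp [pvBinDigits, pvEveryOther, pvBitChar, pvParse, pvBitLen, pvG]
    | false =>
      have h4 : 4 ≤ n := by have := of_decide_eq_false hlt; omega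
      have hdig : pvBinDigits n =
          pvBinDigits (n / 4) ++ [pvBitChar (n / 2 % 2), pvBitChar (n % 2)] := by
        rw [pvBinDigits, dif_neg (by omega), pvBinDigits, dif_neg (by omega)]
        simp [Nat.div_div_eq_div_mul]
      have hlen : (pvBinDigits (n / 4)).length = pvBitLen (n / 4) :=
        pvBinDigits_length _ (by omega)
      have hbl := pvBitLen_div4 n h4
      rw [hdig, pvEveryOther_append_two, hlen]
      have ih4 := ih (n / 4) (by omega)
      by_cases hpar : pvBitLen (n / 4) % 2 = 0
      · have hpn : pvBitLen n % 2 = 0 := by omega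
        rw [if_pos hpar, if_pos hpn]
        rw [if_pos hpar] at ih4
        rw [pvParse_append_one, ih4]
        have hb : n / 2 % 2 < 2 := Nat.mod_lt _ (by norm_num)
        have hv : (if pvBitChar (n / 2 % 2) = '1' then 1 else 0) = n / 2 % 2 := by
          interval_cases hc : n / 2 % 2 <;> simp [pvBitChar]
        rw [hv]
        conv_rhs => rw [pvG]
        rw [if_neg (by omega)]
        have e1 : n / 4 / 2 = n / 8 := by rw [Nat.div_div_eq_div_mul]
        have e2 : n / 2 / 4 = n / 8 := by rw [Nat.div_div_eq_div_mul]
        rw [e1, e2]; ring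
      · have hpn : ¬ pvBitLen n % 2 = 0 := by omega
        rw [if_neg hpar, if_neg hpn]
        rw [if_neg hpar] at ih4
        rw [pvParse_append_one, ih4]
        have hb : n % 2 < 2 := Nat.mod_lt _ (by norm_num)
        have hv : (if pvBitChar (n % 2) = '1' then 1 else 0) = n % 2 := by
          interval_cases hc : n % 2 <;> simp [pvBitChar]
        rw [hv]
        conv_rhs => rw [pvG]
        rw [if_neg (by omega)]
        ring

theorem pvA_eq (n : Nat) :
    get_uneven_bits (n : Int) =
      (pvG (if pvBitLen n % 2 = 0 then n / 2 else n) : Int) := by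
  rw [get_uneven_bits]
  simp only [Int.toNat_natCast]
  set m := if pvBitLen n % 2 = 0 then n / 2 else n with hm
  by_cases he : pvALoop m [] = []
  · simp only [he, ne_eq, not_true_eq_false, if_false]
    have : pvG m = 0 := by
      have := pvA_eq_pvG m
      rw [he] at this
      simpa [pvParse] using this.symm
    simp [this]
  · simp only [ne_eq, he, not_false_eq_true, if_true, pvA_eq_pvG]

-- ===== VERDICT (by name: the statement is the Claim_ definition above) =====
theorem get_uneven_bits_spec : Claim_equal_get_uneven_bits := by
  intro integer _ hpre
  unfold Spec_get_uneven_bits get_uneven_bits_alt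
  obtain ⟨n, rfl⟩ := Int.eq_ofNat_of_zero_le hpre
  rw [pvA_eq n]
  simp only [Int.toNat_natCast]
  rw [pvB_eq n]
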